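-- pv_equiv track=rewrite | github.com/zolunga/PLN | tarea1.py | cleanTokens2
-- ===== SOURCE A (Python) =====
-- def hasNumber(Str):
--     ''' retorna true si encuentra un numero en la cadena '''
--     return any(char.isdigit() for char in Str)
--
-- def cleanTokens2(vocabulario):
--     '''
--     Limpia el vovabulario si esta ordenado y con palabras no repetidas, en
--     ese caso retorna un vovabulario limpio a partir de la letra a, sin simbolos
--     '''
--     vl = []#voc limp
--     ve = []#voc elim
--     for word in vocabulario:
--         if "\\" not in word and "." not in word and not hasNumber(word):
--             vl.append(word)
--         else:
--             ve.append(word)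
--     cont = 0
--     for word in vl:
--         if word.startswith('a'):
--             break
--         cont+=1
--     vl = vl[cont:]
--     return vl
-- ===== SOURCE B (Python) =====
-- def cleanTokens2(vocabulario):
--     '''Single pass: keep clean words, but only from the first one starting with "a".'''
--     result = []
--     started = False
--     for word in vocabulario:
--         if "\\" not in word and "." not in word and not any(c.isdigit() for c in word):
--             if word.startswith('a'):
--                 started = True
--             if started:
--                 result.append(word)
--     return result
-- ===== Notes on version B (the rewrite author's own statement) =====
-- stated objective: simpler
-- what changed: Replaces A's two sequential passes (filter into two lists, then a counted scan and a slice) by one pass with a boolean 'started' flag that starts appending at the first clean word beginning with 'a'; drops the unused eliminated-words list.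
import Mathlib
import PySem

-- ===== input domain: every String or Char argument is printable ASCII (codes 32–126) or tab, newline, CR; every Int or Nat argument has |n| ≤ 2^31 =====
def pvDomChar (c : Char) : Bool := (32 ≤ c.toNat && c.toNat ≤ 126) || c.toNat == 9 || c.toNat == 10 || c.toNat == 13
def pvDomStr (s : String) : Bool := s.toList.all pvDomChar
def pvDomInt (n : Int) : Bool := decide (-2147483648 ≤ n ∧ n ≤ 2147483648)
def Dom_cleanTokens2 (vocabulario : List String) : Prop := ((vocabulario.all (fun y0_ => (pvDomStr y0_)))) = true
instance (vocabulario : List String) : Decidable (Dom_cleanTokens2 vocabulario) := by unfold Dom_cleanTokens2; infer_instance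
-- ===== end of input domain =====

-- B replaces A's filter-then-count-then-slice by one pass with a 'started' flag (objective: simpler).

-- ===== PORT A =====
def hasNumber (str : String) : Bool := str.toList.any (fun c => PySem.Chars.isdigit c)

-- body of A's first for-loop (vl, ve accumulators)
def pvStepA (st : List String × List String) (word : String) : List String × List String :=
  if !(PySem.Str.isIn "\\" word) && !(PySem.Str.isIn "." word) && !(hasNumber word)
  then (st.1 ++ [word], st.2)
  else (st.1, st.2 ++ [word])

-- A's second for-loop: count kept words before the first one starting with 'a' (break)
def pvCountA : List String → Nat
  | [] => 0
  | w :: ws => if PySem.Str.startswith w "a" then 0 else 1 + pvCountA ws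

def cleanTokens2 (vocabulario : List String) : List String :=
  let p := vocabulario.foldl pvStepA ([], [])
  let vl := p.1
  let cont := pvCountA vl
  PySem.List.slice vl (some (cont : Int)) none

-- ===== PORT B =====
-- body of B's single loop: (started, result) state
def pvStepB (st : Bool × List String) (word : String) : Bool × List String :=
  if !(PySem.Str.isIn "\\" word) && !(PySem.Str.isIn "." word)
      && !(word.toList.any (fun c => PySem.Chars.isdigit c))
  then
    let started := st.1 || PySem.Str.startswith word "a"
    (started, if started then st.2 ++ [word] else st.2)
  else st

def cleanTokens2_alt (vocabulario : List String) : List String :=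
  (vocabulario.foldl pvStepB (false, [])).2

-- ===== PRECONDITION & SPEC =====
def Spec_cleanTokens2 (vocabulario : List String) (out : List String) : Prop := out = cleanTokens2_alt vocabulario
instance (vocabulario : List String) (out : List String) : Decidable (Spec_cleanTokens2 vocabulario out) := by unfold Spec_cleanTokens2; infer_instance

-- ===== CLAIM (what is proved, stated in full; the proofs are below) =====
def Claim_equal_cleanTokens2 : Prop := ∀ (vocabulario : List String), Dom_cleanTokens2 vocabulario → Spec_cleanTokens2 vocabulario (cleanTokens2 vocabulario)

-- ===== LEMMAS AND PROOFS =====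

-- the shared keep-predicate, for the proofs
def pvKeep (w : String) : Bool :=
  !(PySem.Str.isIn "\\" w) && !(PySem.Str.isIn "." w) && !(w.toList.any (fun c => PySem.Chars.isdigit c))

theorem pvStepA_keep (st : List String × List String) (w : String) (h : pvKeep w = true) :
    pvStepA st w = (st.1 ++ [w], st.2) := by
  unfold pvStepA
  rw [if_pos (by simpa [pvKeep, hasNumber] using h)]

theorem pvStepA_skip (st : List String × List String) (w : String) (h : pvKeep w = false) :
    pvStepA st w = (st.1, st.2 ++ [w]) := by
  unfold pvStepA
  rw [if_neg (by simp [pvKeep, hasNumber, Bool.not_eq_true] at h ⊢; tauto)]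

theorem pvStepB_keep (st : Bool × List String) (w : String) (h : pvKeep w = true) :
    pvStepB st w = (st.1 || PySem.Str.startswith w "a",
      if st.1 || PySem.Str.startswith w "a" then st.2 ++ [w] else st.2) := by
  unfold pvStepB
  rw [if_pos (by simpa [pvKeep] using h)]

theorem pvStepB_skip (st : Bool × List String) (w : String) (h : pvKeep w = false) :
    pvStepB st w = st := by
  unfold pvStepB
  rw [if_neg (by simp [pvKeep, Bool.not_eq_true] at h ⊢; tauto)]

theorem pvFoldA_fst (l : List String) (vl ve : List String) :
    (l.foldl pvStepA (vl, ve)).1 = vl ++ l.filter pvKeep := by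
  induction l generalizing vl ve with
  | nil => simp
  | cons w ws ih =>
    rw [List.foldl_cons, List.filter_cons]
    by_cases h : pvKeep w = true
    · rw [pvStepA_keep _ _ h, ih, h]
      simp
    · rw [pvStepA_skip _ _ (by simpa [Bool.not_eq_true] using h), ih]
      simp [h]

theorem pvCountA_drop (vl : List String) :
    vl.drop (pvCountA vl) = vl.dropWhile (fun w => !(PySem.Str.startswith w "a")) := by
  induction vl with
  | nil => simp [pvCountA]
  | cons w ws ih =>
    rw [pvCountA]
    by_cases h : PySem.Str.startswith w "a" = true
    · simp at h
      simp [h, List.dropWhile]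
    · simp at h
      simp [h, List.dropWhile, Nat.add_comm 1 (pvCountA ws), ih]

theorem pvFoldB_snd (l : List String) (started : Bool) (acc : List String) :
    (l.foldl pvStepB (started, acc)).2
    = acc ++ (if started then l.filter pvKeep
              else (l.filter pvKeep).dropWhile (fun w => !(PySem.Str.startswith w "a"))) := by
  induction l generalizing started acc with
  | nil => simp
  | cons w ws ih =>
    rw [List.foldl_cons, List.filter_cons]
    by_cases hk : pvKeep w = true
    · rw [pvStepB_keep _ _ hk]
      cases started with
      | true => rw [ih]; simp [hk]
      | false =>
        by_cases ha : PySem.Str.startswith w "a" = true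
        · simp at ha
          rw [ih]; simp [hk, ha, List.dropWhile]
        · simp at ha
          rw [ih]; simp [hk, ha, List.dropWhile]
    · rw [pvStepB_skip _ _ (by simpa [Bool.not_eq_true] using hk), ih]
      simp [Bool.not_eq_true] at hk
      simp [hk]

-- ===== VERDICT (by name: the statement is the Claim_ definition above) =====
theorem cleanTokens2_spec : Claim_equal_cleanTokens2 := by
  intro vocab _
  unfold Spec_cleanTokens2 cleanTokens2 cleanTokens2_alt
  rw [pvFoldB_snd vocab false []]
  simp only [pvFoldA_fst vocab [] [], List.nil_append, Bool.false_eq_true, if_false]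
  rw [PySem.List.slice_from_natCast, pvCountA_drop]
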